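-- pv_equiv track=rewrite | github.com/EDT-Partners-Tech/oss-lecture-backend | utility/parameter_store.py | _categorize_parameter
-- ===== SOURCE A (Python) =====
-- def _categorize_parameter(param_name: str) -> str:
--     """Categorize a parameter based on its prefix."""
--     prefix = next((prefix for prefix in ['API_', 'AWS_', 'BEDROCK_', 'COGNITO_', 'DATABASE_']
--                   if param_name.startswith(prefix)), None)
--
--     if prefix:
--         if prefix == 'AWS_':
--             if param_name.startswith('AWS_S3_'):
--                 return 'S3 Buckets'
--             elif param_name.startswith('AWS_POLLY_'):
--                 return 'AWS Polly'
--             else: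
--                 return 'AWS Core'
--         return prefix.replace('_', ' ').strip()
--     return 'Other'
-- ===== SOURCE B (Python) =====
-- _CATEGORY_TABLE = [
--     ('AWS_S3_', 'S3 Buckets'),
--     ('AWS_POLLY_', 'AWS Polly'),
--     ('AWS_', 'AWS Core'),
--     ('API_', 'API'),
--     ('BEDROCK_', 'BEDROCK'),
--     ('COGNITO_', 'COGNITO'),
--     ('DATABASE_', 'DATABASE'),
-- ]
--
-- def _categorize_parameter(param_name: str) -> str:
--     """Categorize a parameter based on its prefix."""
--     for prefix, category in _CATEGORY_TABLE:
--         if param_name.startswith(prefix):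
--             return category
--     return 'Other'
-- ===== Notes on version B (the rewrite author's own statement) =====
-- stated objective: simpler
-- what changed: Replaced the find-prefix-then-nested-branch structure with a single ordered (prefix, category) lookup table scanned once, first match wins.
import Mathlib
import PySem

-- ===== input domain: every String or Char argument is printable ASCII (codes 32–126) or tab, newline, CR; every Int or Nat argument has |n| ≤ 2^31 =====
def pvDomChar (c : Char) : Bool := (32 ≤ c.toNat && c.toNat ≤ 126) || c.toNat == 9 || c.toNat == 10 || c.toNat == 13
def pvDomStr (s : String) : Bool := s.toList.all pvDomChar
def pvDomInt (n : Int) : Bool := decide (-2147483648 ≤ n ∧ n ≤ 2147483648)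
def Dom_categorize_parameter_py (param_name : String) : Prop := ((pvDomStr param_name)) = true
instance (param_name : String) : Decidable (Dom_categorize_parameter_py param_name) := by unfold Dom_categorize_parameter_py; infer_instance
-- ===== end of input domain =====

-- B replaces A's find-prefix-then-nested-branch control flow with one ordered (prefix, category) lookup table (objective: simpler).

-- ===== PORT A =====
def categorize_parameter_py (param_name : String) : String :=
  -- prefix = next((p for p in [...] if param_name.startswith(p)), None)
  match ["API_", "AWS_", "BEDROCK_", "COGNITO_", "DATABASE_"].find?
      (fun p => PySem.Str.startswith param_name p) with
  | some pfx =>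
      if pfx == "AWS_" then
        if PySem.Str.startswith param_name "AWS_S3_" then "S3 Buckets"
        else if PySem.Str.startswith param_name "AWS_POLLY_" then "AWS Polly"
        else "AWS Core"
      else PySem.Str.strip (PySem.Str.replace pfx "_" " ")
  | none => "Other"

-- ===== PORT B =====
def pvCategoryTable : List (String × String) :=
  [("AWS_S3_", "S3 Buckets"), ("AWS_POLLY_", "AWS Polly"), ("AWS_", "AWS Core"),
   ("API_", "API"), ("BEDROCK_", "BEDROCK"), ("COGNITO_", "COGNITO"), ("DATABASE_", "DATABASE")]

-- the for-loop of Source B: first matching prefix wins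
def pvCatLoop (param_name : String) : List (String × String) → String
  | [] => "Other"
  | (p, c) :: rest =>
      if PySem.Str.startswith param_name p then c else pvCatLoop param_name rest

def categorize_parameter_py_alt (param_name : String) : String :=
  pvCatLoop param_name pvCategoryTable

-- ===== PRECONDITION & SPEC =====
def Spec_categorize_parameter_py (param_name : String) (out : String) : Prop := out = categorize_parameter_py_alt param_name
instance (param_name : String) (out : String) : Decidable (Spec_categorize_parameter_py param_name out) := by unfold Spec_categorize_parameter_py; infer_instance

-- ===== CLAIM (what is proved, stated in full; the proofs are below) =====
def Claim_equal_categorize_parameter_py : Prop := ∀ (param_name : String), Dom_categorize_parameter_py param_name → Spec_categorize_parameter_py param_name (categorize_parameter_py param_name)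

-- ===== LEMMAS AND PROOFS =====

-- a string starting with an extension of q also starts with q
theorem startswith_trans (s p q : List Char)
    (hpq : PySem.Chars.startswith p q = true)
    (h : PySem.Chars.startswith s p = true) : PySem.Chars.startswith s q = true := by
  simp only [PySem.Chars.startswith_iff] at *
  exact hpq.trans h

-- two prefixes of the same string are comparable; incomparable literals give a contradiction
theorem startswith_conflict (s p q : List Char) (hnpq : ¬ (p <+: q ∨ q <+: p))
    (hp : PySem.Chars.startswith s p = true)
    (hq : PySem.Chars.startswith s q = true) : False := by
  rw [PySem.Chars.startswith_iff] at hp hq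
  exact hnpq (List.prefix_or_prefix_of_prefix hp hq)

theorem strip_api : PySem.Str.strip (PySem.Str.replace "API_" "_" " ") = "API" := by decide
theorem strip_bedrock : PySem.Str.strip (PySem.Str.replace "BEDROCK_" "_" " ") = "BEDROCK" := by decide
theorem strip_cognito : PySem.Str.strip (PySem.Str.replace "COGNITO_" "_" " ") = "COGNITO" := by decide
theorem strip_database : PySem.Str.strip (PySem.Str.replace "DATABASE_" "_" " ") = "DATABASE" := by decide

-- ===== VERDICT (by name: the statement is the Claim_ definition above) =====
theorem categorize_parameter_py_spec : Claim_equal_categorize_parameter_py := by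
  intro s _
  unfold Spec_categorize_parameter_py categorize_parameter_py categorize_parameter_py_alt
    pvCategoryTable
  simp only [List.find?, PySem.Str.startswith_eq]
  by_cases h3 : PySem.Chars.startswith s.toList ['A','W','S','_','S','3','_'] = true
  · have haws := startswith_trans s.toList ['A','W','S','_','S','3','_'] ['A','W','S','_'] (by decide) h3
    by_cases hapi : PySem.Chars.startswith s.toList ['A','P','I','_'] = true <;>
      simp [pvCatLoop, h3, haws, hapi, strip_api] <;>
        exact startswith_conflict _ _ _ (by decide) hapi haws
  · by_cases hp : PySem.Chars.startswith s.toList ['A','W','S','_','P','O','L','L','Y','_'] = true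
    · have haws := startswith_trans s.toList ['A','W','S','_','P','O','L','L','Y','_'] ['A','W','S','_'] (by decide) hp
      by_cases hapi : PySem.Chars.startswith s.toList ['A','P','I','_'] = true <;>
        simp [pvCatLoop, h3, hp, haws, hapi, strip_api] <;>
          exact startswith_conflict _ _ _ (by decide) hapi haws
    · by_cases haws : PySem.Chars.startswith s.toList ['A','W','S','_'] = true <;>
        by_cases hapi : PySem.Chars.startswith s.toList ['A','P','I','_'] = true <;>
        by_cases hb : PySem.Chars.startswith s.toList ['B','E','D','R','O','C','K','_'] = true <;>
        by_cases hc : PySem.Chars.startswith s.toList ['C','O','G','N','I','T','O','_'] = true <;>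
        by_cases hd : PySem.Chars.startswith s.toList ['D','A','T','A','B','A','S','E','_'] = true <;>
        simp [pvCatLoop, h3, hp, haws, hapi, hb, hc, hd,
              strip_api, strip_bedrock, strip_cognito, strip_database] <;>
        exact startswith_conflict _ _ _ (by decide) hapi haws
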